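-- pv_equiv track=rewrite | github.com/davidSeijas/AlgebraComputacional | actividad3.py | es_posible_ganar_con_n_piedras
-- ===== SOURCE A (Python) =====
-- def es_posible_ganar_con_n_piedras(n):
--     if n == 0:
--         return True
--     elif n == 1:
--         return False
--     elif 2 <= n < 6:
--         if not(es_posible_ganar_con_n_piedras(n-1) and es_posible_ganar_con_n_piedras(n-2)):
--             return True
--         else:
--             return False
--     else :
--         if not(es_posible_ganar_con_n_piedras(n-1) and es_posible_ganar_con_n_piedras(n-2) and es_posible_ganar_con_n_piedras(n-6)):
--             return True
--         else:
--             return False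
-- ===== SOURCE B (Python) =====
-- def es_posible_ganar_con_n_piedras(n):
--     # losing positions repeat with period 7: exactly n % 7 in {1, 4}
--     return n % 7 not in (1, 4)
-- ===== Notes on version B (the rewrite author's own statement) =====
-- stated objective: faster
-- what changed: Replaces the exponential triple recursion by the closed form n % 7 not in (1,4), after proving the win/lose sequence is periodic with period 7.
import Mathlib
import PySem

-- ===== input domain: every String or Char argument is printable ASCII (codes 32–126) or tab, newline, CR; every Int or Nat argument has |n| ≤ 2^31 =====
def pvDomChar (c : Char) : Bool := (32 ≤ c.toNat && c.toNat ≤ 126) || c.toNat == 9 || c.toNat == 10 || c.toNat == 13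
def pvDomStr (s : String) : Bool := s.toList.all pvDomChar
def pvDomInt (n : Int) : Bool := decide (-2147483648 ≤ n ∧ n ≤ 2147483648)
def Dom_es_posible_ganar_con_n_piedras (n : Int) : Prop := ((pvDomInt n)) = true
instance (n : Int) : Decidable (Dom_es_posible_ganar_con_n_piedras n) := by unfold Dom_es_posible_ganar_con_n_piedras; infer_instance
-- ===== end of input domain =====

-- B replaces A's exponential triple recursion with the closed form n % 7 ∉ {1,4} (period-7 sequence); faster, asymptotic.
-- A raises RecursionError for n < 0 (excluded by Pre_); B returns the periodic value there.

-- ===== PORT A =====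
-- A's recursion, literal step for step, on Nat (A only returns for n ≥ 0, see Pre_).
def pvFA : Nat → Bool
  | m =>
    if m = 0 then true
    else if m = 1 then false
    else if m < 6 then
      if !(pvFA (m - 1) && pvFA (m - 2)) then true else false
    else
      if !(pvFA (m - 1) && pvFA (m - 2) && pvFA (m - 6)) then true else false
termination_by m => m
decreasing_by all_goals omega

def es_posible_ganar_con_n_piedras (n : Int) : Bool := pvFA n.toNat

-- ===== PORT B =====
def es_posible_ganar_con_n_piedras_alt (n : Int) : Bool :=
  !(PySem.Int.mod n 7 == 1 || PySem.Int.mod n 7 == 4)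

-- ===== PRECONDITION & SPEC =====
-- A recurses on n-1, n-2, n-6 with base cases only at 0 and 1: for n < 0 it never
-- terminates (Python raises RecursionError), so Pre_ admits exactly n ≥ 0.
def Pre_es_posible_ganar_con_n_piedras (n : Int) : Prop := 0 ≤ n
instance (n : Int) : Decidable (Pre_es_posible_ganar_con_n_piedras n) := by
  unfold Pre_es_posible_ganar_con_n_piedras; infer_instance
def pvWitness_es_posible_ganar_con_n_piedras : Int := 9


def Spec_es_posible_ganar_con_n_piedras (n : Int) (out : Bool) : Prop := out = es_posible_ganar_con_n_piedras_alt n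
instance (n : Int) (out : Bool) : Decidable (Spec_es_posible_ganar_con_n_piedras n out) := by unfold Spec_es_posible_ganar_con_n_piedras; infer_instance

-- ===== CLAIM (what is proved, stated in full; the proofs are below) =====
def Claim_equal_es_posible_ganar_con_n_piedras : Prop := ∀ (n : Int), Dom_es_posible_ganar_con_n_piedras n → Pre_es_posible_ganar_con_n_piedras n → Spec_es_posible_ganar_con_n_piedras n (es_posible_ganar_con_n_piedras n)

-- ===== LEMMAS AND PROOFS =====

theorem pvFA_closed (m : Nat) : pvFA m = decide (¬ (m % 7 = 1 ∨ m % 7 = 4)) := by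
  induction m using Nat.strong_induction_on with
  | _ m ih =>
    rw [pvFA]
    by_cases h0 : m = 0
    · subst h0; decide
    · by_cases h1 : m = 1
      · subst h1; decide
      · simp only [h0, h1, if_false]
        by_cases h6 : m < 6
        · have hlb : 2 ≤ m := by omega
          rw [ih (m - 1) (by omega), ih (m - 2) (by omega)]
          interval_cases m <;> decide
        · simp only [h6, if_false]
          rw [ih (m - 1) (by omega), ih (m - 2) (by omega), ih (m - 6) (by omega)]
          have e1 : (m - 1) % 7 = (m % 7 + 6) % 7 := by omega
          have e2 : (m - 2) % 7 = (m % 7 + 5) % 7 := by omega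
          have e6 : (m - 6) % 7 = (m % 7 + 1) % 7 := by omega
          rw [e1, e2, e6]
          have hr : m % 7 < 7 := Nat.mod_lt _ (by omega)
          interval_cases h : m % 7 <;> decide

-- ===== VERDICT (by name: the statement is the Claim_ definition above) =====
theorem es_posible_ganar_con_n_piedras_spec : Claim_equal_es_posible_ganar_con_n_piedras := by
  intro n _ hpre
  unfold Pre_es_posible_ganar_con_n_piedras at hpre
  unfold Spec_es_posible_ganar_con_n_piedras es_posible_ganar_con_n_piedras
    es_posible_ganar_con_n_piedras_alt
  rw [pvFA_closed]
  have hn : n = (n.toNat : Int) := by omega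
  have hm : PySem.Int.mod ((n.toNat : Int)) 7 = ((n.toNat % 7 : Nat) : Int) := by
    exact_mod_cast PySem.Int.mod_natCast n.toNat 7
  rw [hn, hm]
  simp only [Int.toNat_natCast]
  by_cases h1 : n.toNat % 7 = 1
  · simp [h1]
  · by_cases h4 : n.toNat % 7 = 4
    · simp [h4]
    · simp [h1, h4]
      omega
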